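-- pv_equiv track=rewrite | github.com/msantl/advent-of-code | 2018/05/2.py | find_and_remove
-- ===== SOURCE A (Python) =====
-- def find_and_remove(poly):
--     if len(poly) == 1:
--         return poly
--
--     res = ""
--     i = 0
--     while i < len(poly):
--         if i + 1 < len(poly) and poly[i].lower() == poly[i+1].lower() and poly[i] != poly[i+1]:
--             i += 1
--         else:
--             res += poly[i]
--
--         i += 1
--     return res
-- ===== SOURCE B (Python) =====
-- import re
-- from string import ascii_lowercase
--
--
-- def find_and_remove(poly):
--     # One left-to-right non-overlapping substitution pass: the regex engine
--     # consumes a reacting pair and continues after it, else advances one char.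
--     pattern = "|".join(c + c.upper() + "|" + c.upper() + c for c in ascii_lowercase)
--     return re.sub(pattern, "", poly)
-- ===== Notes on version B (the rewrite author's own statement) =====
-- stated objective: idiomatic
-- what changed: Replaces the hand-written index/accumulator while-loop with a single re.sub call whose pattern is the alternation of all 52 reacting pairs (aA|Aa|bB|Bb|...), relying on the regex engine's left-to-right non-overlapping scan to do the same one-pass removal.
import Mathlib
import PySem

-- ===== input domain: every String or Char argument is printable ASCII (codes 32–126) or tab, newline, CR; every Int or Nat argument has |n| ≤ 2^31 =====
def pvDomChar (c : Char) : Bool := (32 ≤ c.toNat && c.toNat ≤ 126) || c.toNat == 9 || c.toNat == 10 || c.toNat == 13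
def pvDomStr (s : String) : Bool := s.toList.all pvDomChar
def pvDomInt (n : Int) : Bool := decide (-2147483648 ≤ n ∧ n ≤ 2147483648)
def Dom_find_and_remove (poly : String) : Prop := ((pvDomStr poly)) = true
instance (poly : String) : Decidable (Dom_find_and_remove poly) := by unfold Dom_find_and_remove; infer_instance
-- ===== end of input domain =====

-- B replaces A's index/accumulator while-loop by one regex substitution pass
-- (an alternation of all 52 reacting two-letter pairs); objective: idiomatic.

-- ===== PORT A =====
-- A's while-loop over index i with string accumulator res, transliterated as
-- recursion on i (measure: length - i); the short-circuit 'and' chain becomes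
-- the nested ifs below (both 'and fails' paths do res += poly[i]; i += 1).
def pvALoop (s : List Char) (i : Nat) (res : List Char) : List Char :=
  if h : i < s.length then
    if h2 : i + 1 < s.length then
      if PySem.Chars.lowerChar (s[i]'h) = PySem.Chars.lowerChar (s[i+1]'h2) ∧ (s[i]'h) ≠ (s[i+1]'h2) then
        pvALoop s (i + 2) res                     -- i += 1 inside the branch, then i += 1
      else
        pvALoop s (i + 1) (res ++ [s[i]'h])       -- res += poly[i]; i += 1
    else
      pvALoop s (i + 1) (res ++ [s[i]'h])
  else res
termination_by s.length - i

def find_and_remove (poly : String) : String :=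
  if poly.toList.length = 1 then poly
  else String.ofList (pvALoop poly.toList 0 [])

-- ===== PORT B =====
-- the regex pattern "aA|Aa|bB|Bb|…" as its list of two-char alternatives,
-- built from ascii_lowercase exactly as Source B joins the pattern
def pvAsciiLowercase : List Char :=
  ['a','b','c','d','e','f','g','h','i','j','k','l','m',
   'n','o','p','q','r','s','t','u','v','w','x','y','z']

def pvPattern : List (List Char) :=
  pvAsciiLowercase.flatMap
    (fun c => [[c, PySem.Chars.upperChar c], [PySem.Chars.upperChar c, c]])

-- re.sub(pattern, '', s): scan left to right; where a two-char alternative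
-- matches the match is deleted and the scan resumes after it, otherwise one
-- char is emitted and the scan advances by one.
def pvSub : List Char → List Char
  | [] => []
  | [c] => [c]
  | c1 :: c2 :: rest =>
    if pvPattern.contains [c1, c2] then pvSub rest
    else c1 :: pvSub (c2 :: rest)
termination_by s => s.length

def find_and_remove_alt (poly : String) : String :=
  String.ofList (pvSub poly.toList)

-- ===== PRECONDITION & SPEC =====
def Spec_find_and_remove (poly : String) (out : String) : Prop := out = find_and_remove_alt poly
instance (poly : String) (out : String) : Decidable (Spec_find_and_remove poly out) := by unfold Spec_find_and_remove; infer_instance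

-- ===== CLAIM (what is proved, stated in full; the proofs are below) =====
def Claim_equal_find_and_remove : Prop := ∀ (poly : String), Dom_find_and_remove poly → Spec_find_and_remove poly (find_and_remove poly)

-- ===== LEMMAS AND PROOFS =====

theorem pv_char_eq_of_toNat (c : Char) (n : Nat) (h : c.toNat = n) : c = Char.ofNat n := by
  rw [← h, Char.ofNat_toNat]

theorem pv_isupper_iff (c : Char) :
    PySem.Chars.isupper c = true ↔ 65 ≤ c.toNat ∧ c.toNat ≤ 90 := by
  unfold PySem.Chars.isupper
  rw [Bool.and_eq_true, decide_eq_true_iff, decide_eq_true_iff, Char.le_def, Char.le_def,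
    UInt32.le_iff_toNat_le, UInt32.le_iff_toNat_le]
  exact Iff.rfl

theorem pv_islower_iff (c : Char) :
    PySem.Chars.islower c = true ↔ 97 ≤ c.toNat ∧ c.toNat ≤ 122 := by
  unfold PySem.Chars.islower
  rw [Bool.and_eq_true, decide_eq_true_iff, decide_eq_true_iff, Char.le_def, Char.le_def,
    UInt32.le_iff_toNat_le, UInt32.le_iff_toNat_le]
  exact Iff.rfl

theorem pv_toNat_ofNat_small (n : Nat) (h : n < 0xD800) : (Char.ofNat n).toNat = n := by
  rw [Char.toNat_ofNat]
  simp [Nat.isValidChar, h]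

theorem pv_lowercase_bounds : ∀ c ∈ pvAsciiLowercase, 97 ≤ c.toNat ∧ c.toNat ≤ 122 := by
  simp [pvAsciiLowercase]

theorem pv_mem_lowercase (c : Char) (h1 : 97 ≤ c.toNat) (h2 : c.toNat ≤ 122) :
    c ∈ pvAsciiLowercase := by
  obtain ⟨n, hn⟩ : ∃ n, c.toNat = n := ⟨_, rfl⟩
  rw [hn] at h1 h2
  rw [pv_char_eq_of_toNat c n hn]
  interval_cases n <;> decide

theorem pv_upperChar_toNat (c : Char) (h1 : 97 ≤ c.toNat) (h2 : c.toNat ≤ 122) :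
    (PySem.Chars.upperChar c).toNat = c.toNat - 32 := by
  unfold PySem.Chars.upperChar
  rw [if_pos ((pv_islower_iff c).mpr ⟨h1, h2⟩)]
  exact pv_toNat_ofNat_small _ (by omega)

-- the heart: the 52-alternative pattern matches [c1,c2] exactly when A's
-- reaction test (equal .lower(), unequal chars) fires
theorem pv_react_iff (c1 c2 : Char) :
    pvPattern.contains [c1, c2] = true ↔
      (PySem.Chars.lowerChar c1 = PySem.Chars.lowerChar c2 ∧ c1 ≠ c2) := by
  rw [List.contains_iff_mem]
  constructor
  · intro h
    simp only [pvPattern, List.mem_flatMap, List.mem_cons, List.not_mem_nil, or_false] at h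
    obtain ⟨c, hc, hp⟩ := h
    obtain ⟨hb1, hb2⟩ := pv_lowercase_bounds c hc
    have hun : (PySem.Chars.upperChar c).toNat = c.toNat - 32 := pv_upperChar_toNat c hb1 hb2
    have hupIs : PySem.Chars.isupper (PySem.Chars.upperChar c) = true :=
      (pv_isupper_iff _).mpr (by omega)
    have hlowIs : ¬ PySem.Chars.isupper c = true := by rw [pv_isupper_iff]; omega
    have hlc : PySem.Chars.lowerChar c = c := by
      unfold PySem.Chars.lowerChar; rw [if_neg hlowIs]
    have hlu : PySem.Chars.lowerChar (PySem.Chars.upperChar c) = c := by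
      unfold PySem.Chars.lowerChar
      rw [if_pos hupIs, hun, show c.toNat - 32 + 32 = c.toNat by omega, Char.ofNat_toNat]
    have hne : PySem.Chars.upperChar c ≠ c := by
      intro e; have := congrArg Char.toNat e; omega
    rcases hp with hp | hp <;> rw [List.cons_eq_cons, List.cons_eq_cons] at hp <;>
      obtain ⟨e1, e2, -⟩ := hp <;> subst e1 <;> subst e2
    · exact ⟨by rw [hlc, hlu], fun e => hne e.symm⟩
    · exact ⟨by rw [hlc, hlu], hne⟩
  · rintro ⟨hl, hne⟩
    unfold PySem.Chars.lowerChar at hl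
    simp only [pvPattern, List.mem_flatMap, List.mem_cons, List.not_mem_nil, or_false]
    by_cases u1 : PySem.Chars.isupper c1 = true <;>
      by_cases u2 : PySem.Chars.isupper c2 = true <;> simp only [u1, u2, if_pos,
        Bool.false_eq_true, if_false] at hl
    · -- both upper forces c1 = c2
      obtain ⟨h1a, h1b⟩ := (pv_isupper_iff c1).mp u1
      obtain ⟨h2a, h2b⟩ := (pv_isupper_iff c2).mp u2
      have := congrArg Char.toNat hl
      rw [pv_toNat_ofNat_small _ (by omega), pv_toNat_ofNat_small _ (by omega)] at this
      have : c1 = c2 := by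
        rw [← Char.ofNat_toNat c1, ← Char.ofNat_toNat c2]
        congr 1; omega
      exact absurd this hne
    · -- c1 upper, c2 its lowercase: alternative [upperChar c2, c2]
      obtain ⟨h1a, h1b⟩ := (pv_isupper_iff c1).mp u1
      have hc2 : c2.toNat = c1.toNat + 32 := by
        rw [← hl, pv_toNat_ofNat_small _ (by omega)]
      refine ⟨c2, pv_mem_lowercase c2 (by omega) (by omega), Or.inr ?_⟩
      have hup : PySem.Chars.upperChar c2 = c1 := by
        have := pv_upperChar_toNat c2 (by omega) (by omega)
        rw [pv_char_eq_of_toNat _ _ this, hc2, show c1.toNat + 32 - 32 = c1.toNat by omega,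
          Char.ofNat_toNat]
      rw [hup]
    · -- c2 upper, c1 its lowercase: alternative [c1, upperChar c1]
      obtain ⟨h2a, h2b⟩ := (pv_isupper_iff c2).mp u2
      have hc1 : c1.toNat = c2.toNat + 32 := by
        rw [hl, pv_toNat_ofNat_small _ (by omega)]
      refine ⟨c1, pv_mem_lowercase c1 (by omega) (by omega), Or.inl ?_⟩
      have hup : PySem.Chars.upperChar c1 = c2 := by
        have := pv_upperChar_toNat c1 (by omega) (by omega)
        rw [pv_char_eq_of_toNat _ _ this, hc1, show c2.toNat + 32 - 32 = c2.toNat by omega,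
          Char.ofNat_toNat]
      rw [hup]
    · exact absurd hl hne

theorem pv_loop_eq_fuel (s : List Char) :
    ∀ n i res, s.length - i ≤ n → pvALoop s i res = res ++ pvSub (s.drop i) := by
  intro n
  induction n with
  | zero =>
    intro i res hn
    have hle : s.length ≤ i := by omega
    rw [pvALoop, dif_neg (by omega), List.drop_eq_nil_of_le hle, pvSub, List.append_nil]
  | succ n ih =>
    intro i res hn
    by_cases h : i < s.length
    · by_cases h2 : i + 1 < s.length
      · rw [pvALoop, dif_pos h, dif_pos h2,
          List.drop_eq_getElem_cons h, List.drop_eq_getElem_cons h2, pvSub]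
        by_cases hc : PySem.Chars.lowerChar s[i] = PySem.Chars.lowerChar s[i+1] ∧ s[i] ≠ s[i+1]
        · rw [if_pos hc, if_pos ((pv_react_iff _ _).mpr hc), ih (i + 2) res (by omega)]
        · rw [if_neg hc, if_neg (fun hb => hc ((pv_react_iff _ _).mp hb)),
            ih (i + 1) (res ++ [s[i]]) (by omega), List.drop_eq_getElem_cons h2]
          simp
      · rw [pvALoop, dif_pos h, dif_neg h2, ih (i + 1) (res ++ [s[i]]) (by omega),
          List.drop_eq_getElem_cons h, List.drop_eq_nil_of_le (by omega), pvSub, pvSub,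
          List.append_nil]
    · rw [pvALoop, dif_neg h, List.drop_eq_nil_of_le (by omega), pvSub, List.append_nil]

theorem find_and_remove_spec : Claim_equal_find_and_remove := by
  intro poly _
  unfold Spec_find_and_remove find_and_remove find_and_remove_alt
  by_cases h : poly.toList.length = 1
  · rw [if_pos h]
    obtain ⟨c, hc⟩ := List.length_eq_one_iff.mp h
    rw [hc, pvSub]
    rw [← String.ofList_toList (s := poly), hc]
  · rw [if_neg h, pv_loop_eq_fuel poly.toList poly.toList.length 0 [] (by omega),
      List.drop_zero, List.nil_append]
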